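-- pv_equiv track=rewrite | github.com/Bethany-wong/adventofcode | day1.py | find_digits_str
-- ===== SOURCE A (Python) =====
-- def find_digits_str(line):
--     digits = ["zero", "one", "two", "three", "four", "five", "six", "seven", "eight", "nine"]
--     first = -1
--     last = -1
--     first_num = 0
--     last_num = 0
--     for i in range(len(digits)):
--         start = 0 # find all occurences of a digit
--         while start < len(line):
--             if line.find(digits[i], start) >= 0:
--                 if first == -1:
--                     first = line.find(digits[i], start)
--                     last = first
--                     first_num = i
--                     last_num = i
--                 else:
--                     if line.find(digits[i], start) < first:
--                         first = line.find(digits[i], start)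
--                         first_num = i
--                     elif line.find(digits[i], start) > last:
--                         last = line.find(digits[i], start)
--                         last_num = i
--                 start += len(digits[i])
--             else:
--                 break
--     return first, last, first_num, last_num
-- ===== SOURCE B (Python) =====
-- DIGITS = ["zero", "one", "two", "three", "four", "five", "six", "seven", "eight", "nine"]
--
-- def find_digits_str(line):
--     first = last = -1
--     first_num = last_num = 0
--     for i, w in enumerate(DIGITS):
--         f = line.find(w)
--         if f < 0:
--             continue
--         r = line.rfind(w)
--         if first == -1 or f < first:
--             first, first_num = f, i
--         if last == -1 or r > last:
--             last, last_num = r, i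
--     return first, last, first_num, last_num
-- ===== Notes on version B (the rewrite author's own statement) =====
-- stated objective: simpler
-- what changed: A scans every occurrence of each digit word with a nested while-loop that repeatedly calls line.find(word, start) and steps start by len(word); B drops the inner loop entirely and takes one find() and one rfind() per word, keeping a running global minimum (first) and maximum (last) position.
import Mathlib
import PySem

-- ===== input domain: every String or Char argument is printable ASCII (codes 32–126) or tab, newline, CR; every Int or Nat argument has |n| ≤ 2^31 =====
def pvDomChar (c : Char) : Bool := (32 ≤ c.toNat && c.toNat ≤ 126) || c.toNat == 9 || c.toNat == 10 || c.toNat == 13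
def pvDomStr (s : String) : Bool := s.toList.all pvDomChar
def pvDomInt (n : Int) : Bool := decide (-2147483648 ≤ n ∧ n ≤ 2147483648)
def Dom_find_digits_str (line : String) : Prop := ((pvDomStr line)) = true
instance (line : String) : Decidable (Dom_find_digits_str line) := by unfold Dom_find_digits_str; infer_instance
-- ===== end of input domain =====

-- B replaces A's per-word while-loop scan over every occurrence by a single
-- find/rfind per word (objective: simpler); the return value is proved equal.

-- ===== PORT A =====
-- the literal `digits` list of A
def pvDigitsA : List String :=
  ["zero", "one", "two", "three", "four", "five", "six", "seven", "eight", "nine"]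

-- A's update of (first, last, first_num, last_num) at a found position f
-- (the body of the `if line.find(...) >= 0` branch, extracted as a helper)
def pvUpd (st : Int × Int × Int × Int) (f i : Int) : Int × Int × Int × Int :=
  match st with
  | (first, last, first_num, last_num) =>
    if first = -1 then (f, f, i, i)
    else if f < first then (f, last, i, last_num)
    else if last < f then (first, f, first_num, i)
    else (first, last, first_num, last_num)

-- A's inner `while start < len(line)` loop for the word w = digits[i]; `fuel` only
-- makes the recursion structural (each pass increases `start` by len(w) ≥ 1, so
-- fuel = len(line) + 1 is never exhausted before the loop's own exit conditions).
def pvInnerA (line : String) (w : String) (i : Int) :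
    Nat → Int → Int × Int × Int × Int → Int × Int × Int × Int
  | 0, _, st => st
  | Nat.succ fuel, start, st =>
    if start < PySem.Str.len line then
      let f := PySem.Str.findFrom line w start none   -- line.find(digits[i], start)
      if 0 ≤ f then
        pvInnerA line w i fuel (start + PySem.Str.len w) (pvUpd st f i)   -- start += len(digits[i])
      else st   -- break
    else st

def find_digits_str (line : String) : Int × Int × Int × Int :=
  let digits := pvDigitsA
  (PySem.List.pyRange 0 (digits.length : Int) 1).foldl
    (fun st i =>
      pvInnerA line (PySem.List.pyGetD digits i "") i (line.toList.length + 1) 0 st)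
    (-1, -1, 0, 0)

-- ===== PORT B =====
def pvDIGITS : List String :=
  ["zero", "one", "two", "three", "four", "five", "six", "seven", "eight", "nine"]

def pvStepB (line : String) (st : Int × Int × Int × Int) (iw : Int × String) :
    Int × Int × Int × Int :=
  let f := PySem.Str.find line iw.2
  if f < 0 then st
  else
    let r := PySem.Str.rfind line iw.2
    match st with
    | (first, last, first_num, last_num) =>
      let p1 := if first = -1 ∨ f < first then (f, iw.1) else (first, first_num)
      let p2 := if last = -1 ∨ last < r then (r, iw.1) else (last, last_num)
      (p1.1, p2.1, p1.2, p2.2)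

def find_digits_str_alt (line : String) : Int × Int × Int × Int :=
  (PySem.List.enumerate pvDIGITS 0).foldl (pvStepB line) (-1, -1, 0, 0)

-- ===== PRECONDITION & SPEC =====
def Spec_find_digits_str (line : String) (out : Int × Int × Int × Int) : Prop := out = find_digits_str_alt line
instance (line : String) (out : Int × Int × Int × Int) : Decidable (Spec_find_digits_str line out) := by unfold Spec_find_digits_str; infer_instance

-- ===== CLAIM (what is proved, stated in full; the proofs are below) =====
def Claim_equal_find_digits_str : Prop := ∀ (line : String), Dom_find_digits_str line → Spec_find_digits_str line (find_digits_str line)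

-- ===== LEMMAS AND PROOFS =====

-- invariant of the running state (first, last, first_num, last_num)
def pvInv (st : Int × Int × Int × Int) : Prop :=
  -1 ≤ st.1 ∧ st.1 ≤ st.2.1 ∧ (st.1 = -1 ↔ st.2.1 = -1)

-- the combined effect of A's whole scan: f = first occurrence, r = last occurrence
def pvComb (st : Int × Int × Int × Int) (f r i : Int) : Int × Int × Int × Int :=
  match st with
  | (first, last, first_num, last_num) =>
    if first = -1 then (f, r, i, i)
    else ((if f < first then f else first),
          (if last < r then r else last),
          (if f < first then i else first_num),
          (if last < r then i else last_num))

-- w has no self-overlap (no proper border), so occurrences are ≥ |w| apart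
def pvNoOverlap (w : List Char) : Prop :=
  ∀ k < w.length, 0 < k → w.drop k ≠ w.take (w.length - k)

lemma pvOcc_sep {w l : List Char} (hno : pvNoOverlap w) {p q : Nat}
    (hp : w <+: l.drop p) (hq : w <+: l.drop q) (hlt : p < q) : p + w.length ≤ q := by
  by_contra hcon
  have hcon2 : q < p + w.length := by omega
  set k := q - p with hk
  have hk0 : 0 < k := by omega
  have hkw : k < w.length := by omega
  apply hno k hkw hk0
  have hlp : w.length ≤ l.length - p := by
    have := hp.length_le; simp at this; omega
  have hlq : w.length ≤ l.length - q := by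
    have := hq.length_le; simp at this; omega
  have hwp : ∀ m (hm : m < w.length), l[p + m]'(by omega) = w[m] := by
    intro m hm
    have := List.IsPrefix.getElem hp (i := m) (by simpa using by omega)
    simpa [List.getElem_drop] using this.symm
  have hwq : ∀ m (hm : m < w.length), l[q + m]'(by omega) = w[m] := by
    intro m hm
    have := List.IsPrefix.getElem hq (i := m) (by simpa using by omega)
    simpa [List.getElem_drop] using this.symm
  apply List.ext_getElem
  · simp
  · intro j hj1 hj2
    have hjlt : j < w.length - k := by simpa using hj1
    have e1 : (w.drop k)[j] = w[k + j]'(by omega) := by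
      simp [List.getElem_drop]
    have e2 : (w.take (w.length - k))[j] = w[j]'(by omega) := by
      simp [List.getElem_take]
    rw [e1, e2]
    have e3 := hwp (k + j) (by omega)
    have e4 := hwq j (by omega)
    rw [← e3, ← e4]
    congr 1
    omega

-- spec of PySem.Chars.rfind.go (scans positions n, n-1, …, 0)
lemma pvRfindGo_cases (s sub : List Char) (n : Nat) :
    (PySem.Chars.rfind.go s sub n = -1 ∧ ∀ p ≤ n, ¬ sub <+: s.drop p) ∨
    (∃ q : Nat, q ≤ n ∧ PySem.Chars.rfind.go s sub n = (q : Int) ∧ sub <+: s.drop q ∧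
      ∀ p, q < p → p ≤ n → ¬ sub <+: s.drop p) := by
  induction n with
  | zero =>
    by_cases h : sub.isPrefixOf s
    · right
      refine ⟨0, le_refl 0, ?_, ?_, ?_⟩
      · simp [PySem.Chars.rfind.go, h]
      · simpa [List.isPrefixOf_iff_prefix] using h
      · intro p hp1 hp2; omega
    · left
      constructor
      · simp [PySem.Chars.rfind.go, h]
      · intro p hp
        interval_cases p
        simpa [List.isPrefixOf_iff_prefix] using h
  | succ j ih =>
    by_cases h : sub.isPrefixOf (s.drop (j+1))
    · right
      refine ⟨j+1, le_refl _, ?_, ?_, ?_⟩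
      · simp [PySem.Chars.rfind.go, h]
      · simpa [List.isPrefixOf_iff_prefix] using h
      · intro p hp1 hp2; omega
    · have hnp : ¬ sub <+: s.drop (j+1) := by
        simpa [List.isPrefixOf_iff_prefix] using h
      have hstep : PySem.Chars.rfind.go s sub (j+1) = PySem.Chars.rfind.go s sub j := by
        simp [PySem.Chars.rfind.go, h]
      rcases ih with ⟨h1, h2⟩ | ⟨q, hq1, hq2, hq3, hq4⟩
      · left
        refine ⟨by rw [hstep]; exact h1, ?_⟩
        intro p hp
        rcases Nat.lt_or_ge p (j+1) with hlt | hge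
        · exact h2 p (by omega)
        · have : p = j+1 := by omega
          subst this; exact hnp
      · right
        refine ⟨q, by omega, by rw [hstep]; exact hq2, hq3, ?_⟩
        intro p hp1 hp2
        rcases Nat.lt_or_ge p (j+1) with hlt | hge
        · exact hq4 p hp1 (by omega)
        · have : p = j+1 := by omega
          subst this; exact hnp

lemma pvRfind_cases (s sub : List Char) (hsub : sub ≠ []) :
    (PySem.Chars.rfind s sub = -1 ∧ ∀ p, ¬ sub <+: s.drop p) ∨
    (∃ q : Nat, PySem.Chars.rfind s sub = (q : Int) ∧ sub <+: s.drop q ∧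
      ∀ p, q < p → ¬ sub <+: s.drop p) := by
  have hbig : ∀ p, s.length < p → ¬ sub <+: s.drop p := by
    intro p hp hpre
    have : s.drop p = [] := List.drop_eq_nil_of_le (by omega)
    rw [this] at hpre
    exact hsub (List.prefix_nil.mp hpre)
  rcases pvRfindGo_cases s sub s.length with ⟨h1, h2⟩ | ⟨q, hq1, hq2, hq3, hq4⟩
  · left
    refine ⟨h1, ?_⟩
    intro p
    rcases Nat.lt_or_ge s.length p with hlt | hle
    · exact hbig p hlt
    · exact h2 p hle
  · right
    refine ⟨q, hq2, hq3, ?_⟩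
    intro p hp
    rcases Nat.lt_or_ge s.length p with hlt | hle
    · exact hbig p hlt
    · exact hq4 p hp hle

lemma pvFindFrom_gt_len (s sub : List Char) (k : Int) (hk : (s.length : Int) < k) :
    PySem.Chars.findFrom s sub k none = -1 := by
  have h0 : ¬ k < 0 := by omega
  simp only [PySem.Chars.findFrom, h0, if_false, if_pos hk]

lemma pvFind_nil (w : List Char) (hw : w ≠ []) : PySem.Chars.find [] w = -1 := by
  rw [PySem.Chars.find_eq_neg_one_iff]
  intro hinf
  exact hw (List.infix_nil.mp hinf)

lemma pvFindFrom_ge_len (l w : List Char) (hw : w ≠ []) (k : Nat) (hk : l.length ≤ k) :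
    PySem.Chars.findFrom l w (k : Int) none = -1 := by
  rcases Nat.lt_or_ge l.length k with hlt | hge
  · exact pvFindFrom_gt_len l w _ (by exact_mod_cast hlt)
  · have hk' : k = l.length := by omega
    subst hk'
    rw [PySem.Chars.findFrom_natCast l w l.length (le_refl _)]
    rw [List.drop_length, pvFind_nil w hw]
    simp

lemma pvNoOcc_of_findFrom_neg (l w : List Char) (hw : w ≠ []) (k : Nat)
    (h : PySem.Chars.findFrom l w (k : Int) none < 0) :
    ∀ p, k ≤ p → ¬ w <+: l.drop p := by
  intro p hp hocc
  rcases Nat.lt_or_ge l.length p with hlt | hge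
  · have : l.drop p = [] := List.drop_eq_nil_of_le (by omega)
    rw [this] at hocc
    exact hw (List.prefix_nil.mp hocc)
  · have hkl : k ≤ l.length := by omega
    have heq : PySem.Chars.findFrom l w (k : Int) none = -1 := by
      rw [PySem.Chars.findFrom_natCast l w k hkl] at h ⊢
      split_ifs with hc
      · rfl
      · exfalso
        rw [if_neg hc] at h
        have : -1 ≤ PySem.Chars.find (l.drop k) w := PySem.Chars.neg_one_le_find _ _
        omega
    have hninf := (PySem.Chars.findFrom_natCast_eq_neg_one_iff l w k hkl).mp heq
    apply hninf
    have hsub : l.drop p = (l.drop k).drop (p - k) := by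
      rw [List.drop_drop]
      congr 1
      omega
    rw [hsub] at hocc
    exact hocc.isInfix.trans (List.drop_suffix _ _).isInfix

lemma pvComb_merge {st : Int × Int × Int × Int} {f f' r i : Int}
    (hinv : pvInv st) (hf : 0 ≤ f) (hff : f ≤ f') (hfr : f ≤ r) :
    pvComb (pvUpd st f i) f' r i = pvComb st f r i := by
  obtain ⟨a, b, c, d⟩ := st
  obtain ⟨h1, h2, h3⟩ := hinv
  simp only [pvComb, pvUpd] at *
  split_ifs <;> simp_all <;> omega

lemma pvComb_eq_upd {st : Int × Int × Int × Int} {f i : Int}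
    (hinv : pvInv st) (_hf : 0 ≤ f) : pvComb st f f i = pvUpd st f i := by
  obtain ⟨a, b, c, d⟩ := st
  obtain ⟨h1, h2, h3⟩ := hinv
  simp only [pvComb, pvUpd] at *
  split_ifs <;> simp_all <;> omega

lemma pvInv_comb {st : Int × Int × Int × Int} {f r i : Int}
    (hinv : pvInv st) (hf : 0 ≤ f) (hfr : f ≤ r) : pvInv (pvComb st f r i) := by
  obtain ⟨a, b, c, d⟩ := st
  obtain ⟨h1, h2, h3⟩ := hinv
  simp only [pvComb, pvInv] at *
  split_ifs <;> simp_all <;> omega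

lemma pvInv_upd {st : Int × Int × Int × Int} {f i : Int}
    (hinv : pvInv st) (hf : 0 ≤ f) : pvInv (pvUpd st f i) := by
  obtain ⟨a, b, c, d⟩ := st
  obtain ⟨h1, h2, h3⟩ := hinv
  simp only [pvUpd, pvInv] at *
  split_ifs <;> simp_all <;> omega

-- find ≤ rfind when an occurrence exists, and rfind bounds every occurrence
lemma pvFind_le_rfind (l w : List Char) (hw : w ≠ []) (h : 0 ≤ PySem.Chars.find l w) :
    PySem.Chars.find l w ≤ PySem.Chars.rfind l w ∧
    ∀ p : Nat, w <+: l.drop p → (p : Int) ≤ PySem.Chars.rfind l w := by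
  have hocc := (PySem.Chars.find_spec h).1
  rcases pvRfind_cases l w hw with ⟨h1, h2⟩ | ⟨q, hq1, hq2, hq3⟩
  · exact absurd hocc (h2 _)
  · rw [hq1]
    constructor
    · have : (PySem.Chars.find l w).toNat ≤ q := by
        by_contra hcon
        exact hq3 _ (by omega) hocc
      omega
    · intro p hp
      have : p ≤ q := by
        by_contra hcon
        exact hq3 _ (by omega) hp
      omega

lemma pvStepB_eq (line w : String) (hw : w.toList ≠ []) (i : Int)
    (st : Int × Int × Int × Int) (hinv : pvInv st) :
    pvStepB line st (i, w) =
      (if 0 ≤ PySem.Chars.find line.toList w.toList then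
        pvComb st (PySem.Chars.find line.toList w.toList)
          (PySem.Chars.rfind line.toList w.toList) i
      else st) ∧ pvInv (pvStepB line st (i, w)) := by
  obtain ⟨a, b, c, d⟩ := st
  obtain ⟨h1, h2, h3⟩ := hinv
  set f := PySem.Chars.find line.toList w.toList with hfd
  set r := PySem.Chars.rfind line.toList w.toList with hr
  by_cases hneg : f < 0
  · have e : pvStepB line (a, b, c, d) (i, w) = (a, b, c, d) := by
      simp only [pvStepB]
      simp [← hfd, hneg]
    rw [e]
    refine ⟨by rw [if_neg (by omega)], ⟨h1, h2, h3⟩⟩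
  · have hf0 : 0 ≤ f := by omega
    have hfr : f ≤ r := (pvFind_le_rfind _ _ hw hf0).1
    have e : pvStepB line (a, b, c, d) (i, w) = pvComb (a, b, c, d) f r i := by
      simp only [pvStepB, pvComb, PySem.Str.find_eq, PySem.Str.rfind_eq]
      simp only [← hfd, ← hr, if_neg hneg]
      by_cases ha : a = -1
      · have hb : b = -1 := h3.mp ha
        simp [ha, hb]
      · have hb : ¬ b = -1 := fun hb => ha (h3.mpr hb)
        simp only [ha, hb, false_or, if_false]
        split_ifs <;> rfl
    rw [e, if_pos hf0]
    exact ⟨rfl, pvInv_comb ⟨h1, h2, h3⟩ hf0 hfr⟩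

-- the inner while-loop computes pvComb of the first and last occurrence
lemma pvInnerA_spec (line w : String) (hw : w.toList ≠ []) (hno : pvNoOverlap w.toList)
    (i : Int) : ∀ (fuel start : Nat) (st : Int × Int × Int × Int),
    line.toList.length ≤ start + fuel → pvInv st →
    pvInnerA line w i fuel (start : Int) st =
      if 0 ≤ PySem.Chars.findFrom line.toList w.toList (start : Int) none then
        pvComb st (PySem.Chars.findFrom line.toList w.toList (start : Int) none)
          (PySem.Chars.rfind line.toList w.toList) i
      else st := by
  intro fuel
  induction fuel with
  | zero =>
    intro start st hlen hinv
    rw [pvFindFrom_ge_len _ _ hw start (by omega)]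
    simp [pvInnerA]
  | succ fuel ih =>
    intro start st hlen hinv
    by_cases hs : start < line.toList.length
    case neg =>
      rw [pvFindFrom_ge_len _ _ hw start (by omega)]
      have hsI : ¬ ((start : Int) < PySem.Str.len line) := by
        simp only [PySem.Str.len_eq]
        omega
      simp only [pvInnerA]
      rw [if_neg hsI, if_neg (by norm_num : ¬ ((0:Int) ≤ -1))]
    case pos =>
    have hsI : (start : Int) < PySem.Str.len line := by
      simp only [PySem.Str.len_eq]
      exact_mod_cast hs
    set F := PySem.Chars.findFrom line.toList w.toList (start : Int) none with hFdef
    have hunf : pvInnerA line w i (fuel+1) (start : Int) st =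
        if 0 ≤ F then
          pvInnerA line w i fuel ((start : Int) + PySem.Str.len w) (pvUpd st F i)
        else st := by
      simp only [pvInnerA, PySem.Str.findFrom_eq, ← hFdef]
      rw [if_pos hsI]
    rw [hunf]
    by_cases hF0 : 0 ≤ F
    case neg => rw [if_neg hF0, if_neg hF0]
    case pos =>
    rw [if_pos hF0, if_pos hF0]
    have hL1 : 1 ≤ w.toList.length := List.length_pos_of_ne_nil hw
    have hcast : (start : Int) + PySem.Str.len w = ((start + w.toList.length : Nat) : Int) := by
      simp only [PySem.Str.len_eq]
      push_cast
      ring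
    rw [hcast, ih (start + w.toList.length) (pvUpd st F i) (by omega) (pvInv_upd hinv hF0)]
    obtain ⟨hstartF, hoccF, hminF⟩ :=
      PySem.Chars.findFrom_natCast_spec line.toList w.toList start (le_of_lt hs)
        (by rw [← hFdef]; omega)
    rw [← hFdef] at hstartF hoccF hminF
    rcases pvRfind_cases line.toList w.toList hw with ⟨_, hnone⟩ | ⟨q, hq1, hq2, hq3⟩
    · exact absurd hoccF (hnone _)
    have hFq : F.toNat ≤ q := by
      by_contra hc
      exact hq3 _ (by omega) hoccF
    set F' := PySem.Chars.findFrom line.toList w.toList ((start + w.toList.length : Nat) : Int) none with hF'def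
    by_cases hF' : 0 ≤ F'
    case pos =>
      have hlen2 : start + w.toList.length ≤ line.toList.length := by
        by_contra hc
        rw [hF'def, pvFindFrom_ge_len _ _ hw _ (by omega)] at hF'
        omega
      obtain ⟨hsF', hoccF', hminF'⟩ :=
        PySem.Chars.findFrom_natCast_spec line.toList w.toList (start + w.toList.length)
          hlen2 (by rw [← hF'def]; omega)
      rw [← hF'def] at hsF' hoccF' hminF'
      have hFF' : F ≤ F' := by
        by_contra hc
        exact hminF F'.toNat (by omega) (by omega) hoccF'
      rw [if_pos hF', pvComb_merge hinv hF0 hFF' (by rw [hq1]; omega)]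
    case neg =>
      rw [if_neg hF']
      have hnoOcc := pvNoOcc_of_findFrom_neg line.toList w.toList hw
        (start + w.toList.length) (by rw [← hF'def]; omega)
      have hqF : q = F.toNat := by
        by_contra hc
        have hlt : F.toNat < q := by omega
        have hsep := pvOcc_sep hno hoccF hq2 hlt
        exact hnoOcc q (by omega) hq2
      have hrF : PySem.Chars.rfind line.toList w.toList = F := by
        rw [hq1, hqF]
        omega
      rw [hrF, pvComb_eq_upd hinv hF0]

-- fold congruence threading an invariant
lemma pvFoldl_eq_inv {α σ : Type} (P : σ → Prop) (f g : σ → α → σ) (l : List α)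
    (h : ∀ st a, a ∈ l → P st → f st a = g st a ∧ P (g st a)) :
    ∀ st, P st → l.foldl f st = l.foldl g st := by
  induction l with
  | nil => intro st _; rfl
  | cons x xs ih =>
    intro st hst
    obtain ⟨he, hp⟩ := h st x (List.mem_cons_self) hst
    simp only [List.foldl_cons, he]
    exact ih (fun st a ha hst => h st a (List.mem_cons_of_mem _ ha) hst) _ hp

-- one word of A's outer loop equals one step of B
lemma pvStep_eq (line w : String) (hw : w.toList ≠ []) (hno : pvNoOverlap w.toList)
    (i : Int) (st : Int × Int × Int × Int) (hinv : pvInv st) :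
    pvInnerA line w i (line.toList.length + 1) 0 st = pvStepB line st (i, w) := by
  have h1 := pvInnerA_spec line w hw hno i (line.toList.length + 1) 0 st (by omega) hinv
  simp only [Nat.cast_zero, PySem.Chars.findFrom_zero] at h1
  rw [h1, (pvStepB_eq line w hw i st hinv).1]

-- ===== VERDICT (by name: the statement is the Claim_ definition above) =====
theorem find_digits_str_spec : Claim_equal_find_digits_str := by
  intro line _
  unfold Spec_find_digits_str find_digits_str find_digits_str_alt
  rw [PySem.List.enumerate_eq_map_pyRange (d := ""), List.foldl_map]
  exact (pvFoldl_eq_inv pvInv _ _ _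
    (by
      intro st a ha hst
      have hab := (PySem.List.mem_pyRange_one).mp ha
      have h0 : (0:Int) ≤ a := hab.1
      have h10 : a < 10 := by exact_mod_cast hab.2
      interval_cases a <;>
        exact ⟨pvStep_eq line _ (by decide) (by unfold pvNoOverlap; decide) _ st hst,
          (pvStepB_eq line _ (by decide) _ st hst).2⟩)
    _ (by norm_num [pvInv]))
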